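-- pv_equiv track=rewrite | github.com/chenmengqi-max/cmqnotes | 算法题目/ex3.py | ck
-- ===== SOURCE A (Python) =====
-- def ck(strl):  # 提取属性
--     m = strl
--     n = ''
--     for i in range(len(m)):
--         if m[i] == ',':
--             break
--         n = n + m[i]
--     for i in range(len(n)):
--         if n[0] == '(':
--             n = n[1::]
--             break
--         n = n[1::]
--     return n
-- ===== SOURCE B (Python) =====
-- def ck(strl):
--     c = strl.find(',')
--     head = strl if c == -1 else strl[:c]
--     p = head.find('(')
--     return '' if p == -1 else head[p+1:]
-- ===== Notes on version B (the rewrite author's own statement) =====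
-- stated objective: faster
-- what changed: Replaces A's two character-by-character loops (an index loop building the pre-comma prefix by repeated string concatenation, then a loop stripping the head one char at a time by re-slicing) with two str.find calls and a single slice.
import Mathlib
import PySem

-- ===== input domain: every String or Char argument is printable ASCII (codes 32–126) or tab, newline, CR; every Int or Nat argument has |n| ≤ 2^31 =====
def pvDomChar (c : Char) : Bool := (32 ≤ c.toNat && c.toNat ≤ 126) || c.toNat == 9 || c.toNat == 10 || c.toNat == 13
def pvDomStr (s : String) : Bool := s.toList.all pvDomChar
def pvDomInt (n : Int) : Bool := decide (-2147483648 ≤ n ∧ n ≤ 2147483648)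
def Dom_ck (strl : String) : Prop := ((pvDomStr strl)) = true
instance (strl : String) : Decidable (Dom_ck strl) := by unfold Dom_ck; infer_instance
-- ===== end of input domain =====

-- B replaces A's two quadratic char-by-char loops (string concat / head re-slicing) with str.find plus one slice (measured faster); no argument mutation involved.

-- ===== PORT A =====
-- first loop: copy chars of m into n until a ','
def ckLoop1 : List Char → List Char
  | [] => []
  | c :: rest => if c = ',' then [] else c :: ckLoop1 rest

-- second loop: range(len(n)) iterations, each strips n's head; stops right after stripping a '('
def ckLoop2 : Nat → List Char → List Char
  | 0, n => n
  | _ + 1, [] => []          -- never reached: fuel ≤ length of n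
  | k + 1, c :: rest => if c = '(' then rest else ckLoop2 k rest

def ck (strl : String) : String :=
  let n := ckLoop1 strl.toList
  String.ofList (ckLoop2 n.length n)

-- ===== PORT B =====
def ck_alt (strl : String) : String :=
  let c := PySem.Str.find strl ","
  let head := if c = -1 then strl else PySem.Str.slice strl none (some c)
  let p := PySem.Str.find head "("
  if p = -1 then "" else PySem.Str.slice head (some (p + 1)) none

-- ===== PRECONDITION & SPEC =====
def Spec_ck (strl : String) (out : String) : Prop := out = ck_alt strl
instance (strl : String) (out : String) : Decidable (Spec_ck strl out) := by unfold Spec_ck; infer_instance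

-- ===== CLAIM (what is proved, stated in full; the proofs are below) =====
def Claim_equal_ck : Prop := ∀ (strl : String), Dom_ck strl → Spec_ck strl (ck strl)

-- ===== LEMMAS AND PROOFS =====

-- proof-side normal form of A's second loop: drop everything up to and including the first '(' (or all of it)
def firstDrop (a : Char) : List Char → List Char
  | [] => []
  | c :: rest => if c = a then rest else firstDrop a rest

lemma ckLoop1_eq_takeWhile (l : List Char) : ckLoop1 l = l.takeWhile (fun c => c != ',') := by
  induction l with
  | nil => rfl
  | cons c rest ih =>
    by_cases h : c = ','
    · simp [ckLoop1, List.takeWhile, h]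
    · have hb : (c != ',') = true := by simp [h]
      simp [ckLoop1, List.takeWhile, h, hb, ih]

lemma ckLoop2_eq_firstDrop (l : List Char) : ckLoop2 l.length l = firstDrop '(' l := by
  induction l with
  | nil => rfl
  | cons c rest ih =>
    by_cases h : c = '(' <;> simp [ckLoop2, firstDrop, h, ih]

lemma singleton_prefix_iff (a : Char) (t : List Char) : ([a] <+: t) ↔ t.head? = some a := by
  constructor
  · rintro ⟨u, rfl⟩; rfl
  · intro h
    cases t with
    | nil => simp at h
    | cons x xs => simp at h; exact ⟨xs, by simp [h]⟩

lemma find_absent {l : List Char} {a : Char} (h : PySem.Chars.find l [a] = -1) : a ∉ l := by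
  rw [PySem.Chars.find_eq_neg_one_iff] at h
  exact fun hm => h ((List.singleton_infix_iff a l).mpr hm)

lemma takeWhile_absent {l : List Char} {a : Char} (h : a ∉ l) :
    l.takeWhile (fun c => c != a) = l := by
  induction l with
  | nil => rfl
  | cons c rest ih =>
    simp at h
    have hb : (c != a) = true := by simp [Ne.symm h.1]
    simp [List.takeWhile, hb, ih h.2]

lemma firstDrop_absent {l : List Char} {a : Char} (h : a ∉ l) : firstDrop a l = [] := by
  induction l with
  | nil => rfl
  | cons c rest ih =>
    simp at h
    simp [firstDrop, Ne.symm h.1, ih h.2]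

-- first-occurrence characterisation: takeWhile / firstDrop as take / drop at index k
lemma occ_take_drop {a : Char} :
    ∀ (l : List Char) (k : Nat), l[k]? = some a → (∀ i, i < k → l[i]? ≠ some a) →
      l.takeWhile (fun c => c != a) = l.take k ∧ firstDrop a l = l.drop (k + 1) := by
  intro l
  induction l with
  | nil => intro k h _; simp at h
  | cons c rest ih =>
    intro k h hmin
    cases k with
    | zero =>
      simp at h
      simp [List.takeWhile, firstDrop, h]
    | succ k =>
      have hc : c ≠ a := by
        have := hmin 0 (Nat.succ_pos k)
        simpa using this
      have hrest := ih k (by simpa using h)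
        (fun i hi => by simpa using hmin (i + 1) (Nat.succ_lt_succ hi))
      have hb : (c != a) = true := by simp [hc]
      simp [List.takeWhile, firstDrop, hc, hb, hrest.1, hrest.2]

-- the find-based head/tail facts, from PySem.Chars.find_spec
lemma find_char_spec {l : List Char} {a : Char} (h : PySem.Chars.find l [a] ≠ -1) :
    l[(PySem.Chars.find l [a]).toNat]? = some a ∧
      ∀ i, i < (PySem.Chars.find l [a]).toNat → l[i]? ≠ some a := by
  have h0 : 0 ≤ PySem.Chars.find l [a] := by
    have := PySem.Chars.neg_one_le_find l [a]
    omega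
  obtain ⟨hpre, hmin⟩ := PySem.Chars.find_spec (s := l) (sub := [a]) h0
  refine ⟨?_, ?_⟩
  · have := (singleton_prefix_iff a _).mp hpre
    simpa [List.head?_drop] using this
  · intro i hi hcontra
    exact hmin i hi ((singleton_prefix_iff a _).mpr (by simpa [List.head?_drop] using hcontra))

lemma paren_part (h : String) :
    (if PySem.Str.find h "(" = -1 then "" else PySem.Str.slice h (some (PySem.Str.find h "(" + 1)) none)
      = String.ofList (firstDrop '(' h.toList) := by
  simp only [PySem.Str.find_eq, show ("(" : String).toList = ['('] from rfl]
  by_cases hp : PySem.Chars.find h.toList ['('] = -1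
  · simp [hp, firstDrop_absent (find_absent hp)]
  · have h0 : 0 ≤ PySem.Chars.find h.toList ['('] := by
      have := PySem.Chars.neg_one_le_find h.toList ['(']
      omega
    obtain ⟨h1, h2⟩ := find_char_spec hp
    have hfd := (occ_take_drop h.toList (PySem.Chars.find h.toList ['(']).toNat h1 h2).2
    rw [if_neg hp]
    apply String.toList_injective
    rw [PySem.Str.toList_slice, PySem.Chars.slice_eq_listSlice,
        PySem.List.slice_from _ (by omega : (0:Int) ≤ PySem.Chars.find h.toList ['('] + 1)]
    have : (PySem.Chars.find h.toList ['('] + 1).toNat = (PySem.Chars.find h.toList ['(']).toNat + 1 := by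
      omega
    simp [this, hfd]

lemma ck_eq_ck_alt (strl : String) : ck strl = ck_alt strl := by
  show String.ofList (ckLoop2 (ckLoop1 strl.toList).length (ckLoop1 strl.toList)) =
      (if PySem.Str.find (if PySem.Str.find strl "," = -1 then strl
            else PySem.Str.slice strl none (some (PySem.Str.find strl ","))) "(" = -1 then ""
        else PySem.Str.slice (if PySem.Str.find strl "," = -1 then strl
            else PySem.Str.slice strl none (some (PySem.Str.find strl ",")))
          (some (PySem.Str.find (if PySem.Str.find strl "," = -1 then strl
            else PySem.Str.slice strl none (some (PySem.Str.find strl ","))) "(" + 1)) none)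
  rw [ckLoop1_eq_takeWhile, ckLoop2_eq_firstDrop, paren_part]
  congr 1
  simp only [PySem.Str.find_eq, show ("," : String).toList = [','] from rfl]
  by_cases hc : PySem.Chars.find strl.toList [','] = -1
  · simp [hc, takeWhile_absent (find_absent hc)]
  · have h0 : 0 ≤ PySem.Chars.find strl.toList [','] := by
      have := PySem.Chars.neg_one_le_find strl.toList [',']
      omega
    obtain ⟨h1, h2⟩ := find_char_spec hc
    have := (occ_take_drop strl.toList (PySem.Chars.find strl.toList [',']).toNat h1 h2).1
    simp [hc, PySem.Str.toList_slice, PySem.Chars.slice_eq_listSlice,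
      PySem.List.slice_to _ h0, this]

-- ===== VERDICT (by name: the statement is the Claim_ definition above) =====
theorem ck_spec : Claim_equal_ck := by
  intro strl _
  unfold Spec_ck
  exact ck_eq_ck_alt strl
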